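-- pv_equiv track=rewrite | github.com/rjhunjhunwala/TinyBigLoop | wordle.py | get_one_solution_hardcoded_smt
-- ===== SOURCE A (Python) =====
-- from collections import Counter
--
-- ALPHABET = "abcdefghijklmnopqrstuvwxyz"
--
-- def get_bitvec(word: str) -> int:
--     out = 0
--     counts = Counter(word)
--     for i, ch in enumerate(ALPHABET):
--         out += counts[ch] << i
--     return out
--
-- def get_one_solution_hardcoded_smt(dictionary: list[str]) -> list[list[str]]:
--     """
--     Output of hardcoded run
--     word4 := 35668104_32
-- word0 := 656404_32
-- word1 := 17863168_32
-- word2 := 10562_32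
-- word3 := 4522017_32
--
--     :param dictionary:
--     :return:
--     """
--     hardcoded = [35668104, 656404, 17863168, 10562, 4522017]
--     out = [[]]
--
--     for vec in hardcoded:
--         for word in dictionary:
--             if len(set(word)) == len(word) and get_bitvec(word) == vec:
--                 out[0].append(word)
--                 break
--
--     return out
-- ===== SOURCE B (Python) =====
-- ALPHABET = "abcdefghijklmnopqrstuvwxyz"
--
-- def get_bitvec(word: str) -> int:
--     from collections import Counter
--     out = 0
--     counts = Counter(word)
--     for i, ch in enumerate(ALPHABET):
--         out += counts[ch] << i
--     return out
--
-- def get_one_solution_hardcoded_smt(dictionary: list[str]) -> list[list[str]]: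
--     hardcoded = [35668104, 656404, 17863168, 10562, 4522017]
--     index = {}
--     for word in dictionary:
--         if len(set(word)) == len(word):
--             index.setdefault(get_bitvec(word), word)
--     return [[index[vec] for vec in hardcoded if vec in index]]
-- ===== Notes on version B (the rewrite author's own statement) =====
-- stated objective: faster
-- what changed: Replaces A's five separate break-on-first-match scans of the dictionary with a single indexing pass (setdefault dict keyed by bitvec, keeping the first matching word) followed by five O(1)-style lookups over the hardcoded vectors.
import Mathlib
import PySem

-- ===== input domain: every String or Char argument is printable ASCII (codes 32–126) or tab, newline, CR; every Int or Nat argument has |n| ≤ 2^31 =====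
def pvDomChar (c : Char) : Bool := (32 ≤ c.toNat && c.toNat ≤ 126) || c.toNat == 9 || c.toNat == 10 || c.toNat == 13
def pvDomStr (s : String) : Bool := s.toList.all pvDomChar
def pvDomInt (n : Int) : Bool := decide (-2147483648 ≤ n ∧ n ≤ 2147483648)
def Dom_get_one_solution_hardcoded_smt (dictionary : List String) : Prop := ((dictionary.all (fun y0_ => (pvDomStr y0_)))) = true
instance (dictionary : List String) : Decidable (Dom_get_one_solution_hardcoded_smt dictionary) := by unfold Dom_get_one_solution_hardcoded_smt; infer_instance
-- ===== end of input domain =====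

-- B replaces A's five full scans of the dictionary by one indexing pass (first-match dict via setdefault) plus five lookups.

-- ===== PORT A =====
def ALPHABET : String := "abcdefghijklmnopqrstuvwxyz"

-- shared helper (identical in both Pythons): get_bitvec
def get_bitvec (word : String) : Int :=
  let counts := PySem.Dict.counter word.toList
  (PySem.List.enumerate ALPHABET.toList).foldl (fun out p => out + (counts.getD p.2 0) <<< p.1) 0

-- inner 'for word in dictionary: … break' loop of A, as List.find? on the same test
def get_one_solution_hardcoded_smt (dictionary : List String) : List (List String) :=
  let hardcoded : List Int := [35668104, 656404, 17863168, 10562, 4522017]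
  let out0 : List String :=
    hardcoded.foldl (fun acc vec =>
      match dictionary.find? (fun word =>
          ((PySem.Set.ofList word.toList).length == word.toList.length) &&
          (get_bitvec word == vec)) with
      | some word => acc ++ [word]
      | none => acc) []
  [out0]

-- ===== PORT B =====
def get_one_solution_hardcoded_smt_alt (dictionary : List String) : List (List String) :=
  let hardcoded : List Int := [35668104, 656404, 17863168, 10562, 4522017]
  let index : PySem.Dict Int String :=
    dictionary.foldl (fun d word =>
      if (PySem.Set.ofList word.toList).length == word.toList.length then
        d.setdefault (get_bitvec word) word
      else d) PySem.Dict.empty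
  [hardcoded.filterMap (fun vec => index.get? vec)]

-- ===== PRECONDITION & SPEC =====
def Spec_get_one_solution_hardcoded_smt (dictionary : List String) (out : List (List String)) : Prop := out = get_one_solution_hardcoded_smt_alt dictionary
instance (dictionary : List String) (out : List (List String)) : Decidable (Spec_get_one_solution_hardcoded_smt dictionary out) := by unfold Spec_get_one_solution_hardcoded_smt; infer_instance

-- ===== CLAIM (what is proved, stated in full; the proofs are below) =====
def Claim_equal_get_one_solution_hardcoded_smt : Prop := ∀ (dictionary : List String), Dom_get_one_solution_hardcoded_smt dictionary → Spec_get_one_solution_hardcoded_smt dictionary (get_one_solution_hardcoded_smt dictionary)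

-- ===== LEMMAS AND PROOFS =====

-- the setdefault-index lookup is the first matching word of the scan
theorem index_get?_eq_find? (ws : List String) (d : PySem.Dict Int String) (v : Int) :
    (ws.foldl (fun d word =>
      if (PySem.Set.ofList word.toList).length == word.toList.length then
        d.setdefault (get_bitvec word) word
      else d) d).get? v
    = (d.get? v).or (ws.find? (fun word =>
          ((PySem.Set.ofList word.toList).length == word.toList.length) &&
          (get_bitvec word == v))) := by
  induction ws generalizing d with
  | nil => simp
  | cons w ws ih =>
    simp only [List.foldl_cons, List.find?_cons]
    by_cases hd : ((PySem.Set.ofList w.toList).length == w.toList.length) = true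
    · rw [if_pos (by simpa using hd)]
      simp only [hd, Bool.true_and]
      by_cases hv : get_bitvec w = v
      · subst hv
        rw [ih]
        by_cases hc : d.contains (get_bitvec w) = true
        · rw [PySem.Dict.setdefault_of_contains _ _ hc]
          rcases ho : d.get? (get_bitvec w) with _ | x
          · exact absurd ((PySem.Dict.get?_eq_none_iff_contains _ _).mp ho) (by simp [hc])
          · simp
        · rw [PySem.Dict.setdefault_of_not_contains _ _ (by simpa using hc),
            PySem.Dict.get?_insert_self,
            (PySem.Dict.get?_eq_none_iff_contains _ _).mpr (by simpa using hc)]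
          simp
      · have hne : (get_bitvec w == v) = false := by simp [hv]
        have hget : (d.setdefault (get_bitvec w) w).get? v = d.get? v := by
          by_cases hc : d.contains (get_bitvec w) = true
          · rw [PySem.Dict.setdefault_of_contains _ _ hc]
          · rw [PySem.Dict.setdefault_of_not_contains _ _ (by simpa using hc)]
            exact PySem.Dict.get?_insert_of_ne _ _ (fun h => hv h.symm)
        rw [ih, hget, hne]
    · rw [if_neg (by simpa using hd)]
      rw [ih]
      simp only [Bool.not_eq_true] at hd
      simp only [hd, Bool.false_and]

-- the append-on-hit fold is filterMap
theorem foldl_match_append (f : Int → Option String) (hs : List Int) (acc : List String) :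
    hs.foldl (fun acc vec => match f vec with
      | some word => acc ++ [word]
      | none => acc) acc = acc ++ hs.filterMap f := by
  induction hs generalizing acc with
  | nil => simp
  | cons h t ih =>
    simp only [List.foldl_cons, List.filterMap_cons]
    cases f h <;> simp [ih]

-- ===== VERDICT (by name: the statement is the Claim_ definition above) =====
theorem get_one_solution_hardcoded_smt_spec : Claim_equal_get_one_solution_hardcoded_smt := by
  intro dictionary _
  unfold Spec_get_one_solution_hardcoded_smt
  unfold get_one_solution_hardcoded_smt get_one_solution_hardcoded_smt_alt
  simp only [foldl_match_append, index_get?_eq_find?, PySem.Dict.get?_empty, Option.none_or,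
    List.nil_append]
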